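-- pv_equiv track=rewrite | github.com/marceloruizrodriguez/Demo_Scheduling | GAPymoo.py | segment_task
-- ===== SOURCE A (Python) =====
-- def segment_task(current_time, current_day, shift_start, shift_end, duration, id, priority, sector,
--                  technician, ticket_id):
--     initial_duration = duration
--     subtasks = []
--     current_day_tmp = current_day
--     # Calculate the remaining time in the current shift
--     remaining_time = shift_end - current_time
--     available_time = shift_end - shift_start
--     # If the duration is less than or equal to the remaining time in the current shift, add the subtask
--     if duration <= remaining_time:
--         subtasks.append(
--             [current_time, current_time + duration, current_day_tmp, id, initial_duration, priority, sector,
--              technician, ticket_id, 0])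
--     else:
--         # Add the first subtask that ends at the end of the current shift
--         if remaining_time > 0:
--             subtasks.append(
--                 [current_time, shift_end, current_day_tmp, id, initial_duration, priority, sector, technician, ticket_id, 0])
--             duration -= remaining_time
--             # Add the remaining subtasks
--             current_day_tmp += 1
--         else:
--             current_day_tmp += 1
--         while duration > 0:
--             start_time = shift_start
--             end_time = start_time + min(available_time, duration)
--             subtasks.append(
--                 [start_time, end_time, current_day_tmp, id, initial_duration, priority, sector, technician, ticket_id, 0])
--             # Update the duration
--             duration -= min(available_time, duration)
--             current_day_tmp += 1
--     subtasks[-1][-1] = 1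
--     return subtasks
-- ===== SOURCE B (Python) =====
-- def segment_task(current_time, current_day, shift_start, shift_end, duration, id, priority, sector,
--                  technician, ticket_id):
--     info = [id, duration, priority, sector, technician, ticket_id]
--     first = shift_end - current_time
--     if duration <= first:
--         return [[current_time, current_time + duration, current_day] + info + [1]]
--     avail = shift_end - shift_start
--     # phase 1: cumulative amounts of work completed at each shift boundary, in (0, duration)
--     cuts = [0]
--     t = first if first > 0 else avail
--     while t < duration:
--         cuts.append(t)
--         t += avail
--     cuts.append(duration)
--     # phase 2: render each consecutive pair of breakpoints as one subtask row
--     rows = []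
--     start = current_time if first > 0 else shift_start
--     day = current_day if first > 0 else current_day + 1
--     for lo, hi in zip(cuts, cuts[1:]):
--         rows.append([start, start + (hi - lo), day] + info + [1 if hi == duration else 0])
--         start, day = shift_start, day + 1
--     return rows
-- ===== Notes on version B (the rewrite author's own statement) =====
-- stated objective: alternative
-- what changed: B is two staged passes: it first builds the list of cumulative work breakpoints (0, shift boundaries inside the task, duration) with a while loop, then renders each consecutive pair of breakpoints into one row, deciding the done-flag locally from hi == duration instead of A's emit-then-mutate-last pass.
import Mathlib
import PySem

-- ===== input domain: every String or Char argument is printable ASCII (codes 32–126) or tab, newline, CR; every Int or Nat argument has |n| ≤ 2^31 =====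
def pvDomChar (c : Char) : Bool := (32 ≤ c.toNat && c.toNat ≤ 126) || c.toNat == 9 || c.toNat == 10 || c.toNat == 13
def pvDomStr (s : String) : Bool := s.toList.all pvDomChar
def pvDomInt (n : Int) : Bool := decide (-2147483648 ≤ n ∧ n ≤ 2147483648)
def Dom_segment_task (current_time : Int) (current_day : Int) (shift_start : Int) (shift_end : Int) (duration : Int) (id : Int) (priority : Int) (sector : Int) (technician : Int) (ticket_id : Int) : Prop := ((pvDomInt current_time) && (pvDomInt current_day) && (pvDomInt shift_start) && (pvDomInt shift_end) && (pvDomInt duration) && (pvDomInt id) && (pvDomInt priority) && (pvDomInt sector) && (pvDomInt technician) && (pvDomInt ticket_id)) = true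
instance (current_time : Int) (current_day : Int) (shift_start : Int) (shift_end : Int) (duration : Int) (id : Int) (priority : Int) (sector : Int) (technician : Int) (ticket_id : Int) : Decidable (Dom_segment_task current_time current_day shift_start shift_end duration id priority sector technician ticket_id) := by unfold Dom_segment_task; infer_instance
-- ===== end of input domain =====

-- B is a two-phase rewrite: first compute the list of cumulative work breakpoints, then render
-- each consecutive pair of breakpoints as one row (no post-hoc mutation of the last row's flag).

-- ===== PORT A =====
-- subtasks[-1][-1] = 1; on the empty list Python raises IndexError (excluded by Pre_)
def setLastElem1 : List Int → List Int
  | [] => []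
  | [_] => [1]
  | x :: y :: ys => x :: setLastElem1 (y :: ys)

def setLast1 : List (List Int) → List (List Int)
  | [] => []
  | [r] => [setLastElem1 r]
  | r :: s :: rs => r :: setLast1 (s :: rs)

-- the 'while duration > 0' loop of A; '0 < avail' is a totality guard only
-- (the Python loop never terminates when it runs with avail ≤ 0; Pre_ excludes that)
def segLoop (shift_start avail : Int) (info : List Int) (duration day : Int) : List (List Int) :=
  if h : 0 < duration then
    if ha : 0 < avail then
      ([shift_start, shift_start + min avail duration, day] ++ info ++ [0]) ::
        segLoop shift_start avail info (duration - min avail duration) (day + 1)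
    else []
  else []
  termination_by duration.toNat
  decreasing_by omega

def segment_task (current_time : Int) (current_day : Int) (shift_start : Int) (shift_end : Int) (duration : Int) (id : Int) (priority : Int) (sector : Int) (technician : Int) (ticket_id : Int) : List (List Int) :=
  let initial_duration := duration
  let remaining_time := shift_end - current_time
  let available_time := shift_end - shift_start
  let info : List Int := [id, initial_duration, priority, sector, technician, ticket_id]
  let subtasks :=
    if duration ≤ remaining_time then
      [[current_time, current_time + duration, current_day] ++ info ++ [0]]
    else if 0 < remaining_time then
      ([current_time, shift_end, current_day] ++ info ++ [0]) ::
        segLoop shift_start available_time info (duration - remaining_time) (current_day + 1)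
    else
      segLoop shift_start available_time info duration (current_day + 1)
  setLast1 subtasks

-- ===== PORT B =====
-- phase 1 of Source B: the 'while t < duration' loop collecting breakpoints; '0 < avail' is a
-- totality guard only (the Python loop never terminates when it runs with avail ≤ 0)
def cutsLoop (avail duration t : Int) : List Int :=
  if h : t < duration then
    if ha : 0 < avail then t :: cutsLoop avail duration (t + avail)
    else []
  else []
  termination_by (duration - t).toNat
  decreasing_by omega

-- phase 2 of Source B: the 'for lo, hi in zip(cuts, cuts[1:])' loop carrying (start, day)
def renderLoop (shift_start dur : Int) (info : List Int) : List (Int × Int) → Int → Int → List (List Int)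
  | [], _, _ => []
  | (lo, hi) :: rest, start, day =>
      ([start, start + (hi - lo), day] ++ info ++ [if hi = dur then 1 else 0]) ::
        renderLoop shift_start dur info rest shift_start (day + 1)

def segment_task_alt (current_time : Int) (current_day : Int) (shift_start : Int) (shift_end : Int) (duration : Int) (id : Int) (priority : Int) (sector : Int) (technician : Int) (ticket_id : Int) : List (List Int) :=
  let info : List Int := [id, duration, priority, sector, technician, ticket_id]
  let first := shift_end - current_time
  if duration ≤ first then
    [[current_time, current_time + duration, current_day] ++ info ++ [1]]
  else
    let avail := shift_end - shift_start
    let cuts := 0 :: (cutsLoop avail duration (if 0 < first then first else avail) ++ [duration])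
    renderLoop shift_start duration info (cuts.zip (cuts.drop 1))
      (if 0 < first then current_time else shift_start)
      (if 0 < first then current_day else current_day + 1)

-- ===== PRECONDITION & SPEC =====
-- Pre_ excludes exactly the inputs on which A does not return: when duration exceeds the time
-- left in the first shift, A raises IndexError if duration ≤ 0 (nothing was appended) and loops
-- forever if shift_start ≥ shift_end; on every other input A returns normally.
def Pre_segment_task (current_time : Int) (current_day : Int) (shift_start : Int) (shift_end : Int) (duration : Int) (id : Int) (priority : Int) (sector : Int) (technician : Int) (ticket_id : Int) : Prop :=
  duration ≤ shift_end - current_time ∨ (0 < duration ∧ shift_start < shift_end)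
instance (current_time : Int) (current_day : Int) (shift_start : Int) (shift_end : Int) (duration : Int) (id : Int) (priority : Int) (sector : Int) (technician : Int) (ticket_id : Int) : Decidable (Pre_segment_task current_time current_day shift_start shift_end duration id priority sector technician ticket_id) := by unfold Pre_segment_task; infer_instance

def pvWitness_segment_task : Int × Int × Int × Int × Int × Int × Int × Int × Int × Int := (0, 0, 0, 8, 3, 1, 1, 1, 1, 1)

def Spec_segment_task (current_time : Int) (current_day : Int) (shift_start : Int) (shift_end : Int) (duration : Int) (id : Int) (priority : Int) (sector : Int) (technician : Int) (ticket_id : Int) (out : List (List Int)) : Prop := out = segment_task_alt current_time current_day shift_start shift_end duration id priority sector technician ticket_id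
instance (current_time : Int) (current_day : Int) (shift_start : Int) (shift_end : Int) (duration : Int) (id : Int) (priority : Int) (sector : Int) (technician : Int) (ticket_id : Int) (out : List (List Int)) : Decidable (Spec_segment_task current_time current_day shift_start shift_end duration id priority sector technician ticket_id out) := by unfold Spec_segment_task; infer_instance

-- ===== CLAIM (what is proved, stated in full; the proofs are below) =====
def Claim_equal_segment_task : Prop := ∀ (current_time : Int) (current_day : Int) (shift_start : Int) (shift_end : Int) (duration : Int) (id : Int) (priority : Int) (sector : Int) (technician : Int) (ticket_id : Int), Dom_segment_task current_time current_day shift_start shift_end duration id priority sector technician ticket_id → Pre_segment_task current_time current_day shift_start shift_end duration id priority sector technician ticket_id → Spec_segment_task current_time current_day shift_start shift_end duration id priority sector technician ticket_id (segment_task current_time current_day shift_start shift_end duration id priority sector technician ticket_id)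

-- ===== LEMMAS AND PROOFS =====

theorem setLastElem1_append (l : List Int) (x : Int) : setLastElem1 (l ++ [x]) = l ++ [1] := by
  induction l with
  | nil => simp [setLastElem1]
  | cons a l ih => cases l <;> simp_all [setLastElem1]

theorem setLastElem1_row (a b c x : Int) (l : List Int) :
    setLastElem1 ([a, b, c] ++ l ++ [x]) = [a, b, c] ++ l ++ [1] := by
  simpa using setLastElem1_append ([a, b, c] ++ l) x

theorem setLast1_cons (r : List Int) (t : List (List Int)) (h : t ≠ []) :
    setLast1 (r :: t) = r :: setLast1 t := by
  cases t with
  | nil => exact absurd rfl h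
  | cons s rs => simp [setLast1]

theorem segLoop_ne_nil (ss avail : Int) (info : List Int) (d day : Int)
    (hd : 0 < d) (ha : 0 < avail) : segLoop ss avail info d day ≠ [] := by
  rw [segLoop, dif_pos hd, dif_pos ha]; simp

-- phase 2 over the breakpoints counted from c equals A's flagged while-loop on duration - c
theorem render_eq_segLoop (ss avail dur : Int) (info : List Int) (ha : 0 < avail) :
    ∀ (m : Nat) (c day : Int), (dur - c).toNat ≤ m → c < dur →
    renderLoop ss dur info
      ((c :: (cutsLoop avail dur (c + avail) ++ [dur])).zip (cutsLoop avail dur (c + avail) ++ [dur]))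
      ss day
      = setLast1 (segLoop ss avail info (dur - c) day) := by
  intro m
  induction m with
  | zero => intro c day hm hc; omega
  | succ m ih =>
    intro c day hm hc
    have hd : 0 < dur - c := by omega
    rw [segLoop, dif_pos hd, dif_pos ha]
    by_cases hcase : dur ≤ c + avail
    · -- last chunk: breakpoint loop stops at once
      have hcl : cutsLoop avail dur (c + avail) = [] := by
        rw [cutsLoop, dif_neg (by omega : ¬ c + avail < dur)]
      have hmin : min avail (dur - c) = dur - c := min_eq_right (by omega)
      rw [hcl, hmin, sub_self, segLoop, dif_neg (by omega : ¬ (0:Int) < 0)]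
      simp only [List.nil_append, List.zip_cons_cons, List.zip_nil_right]
      rw [setLast1, setLastElem1_row]
      simp [renderLoop]
    · -- one full chunk peeled from both sides
      replace hcase : c + avail < dur := by omega
      have hcl : cutsLoop avail dur (c + avail) =
          (c + avail) :: cutsLoop avail dur (c + avail + avail) := by
        rw [cutsLoop, dif_pos hcase, dif_pos ha]
      have hmin : min avail (dur - c) = avail := min_eq_left (by omega)
      have hd' : 0 < dur - (c + avail) := by omega
      have hm' : (dur - (c + avail)).toNat ≤ m := by omega
      have hne := segLoop_ne_nil ss avail info (dur - c - avail) (day + 1)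
        (by omega) ha
      rw [hcl, hmin, setLast1_cons _ _ (by
        have : dur - c - avail = dur - (c + avail) := by ring
        rw [this] at hne ⊢
        simpa using hne)]
      have ihr := ih (c + avail) (day + 1) hm' (by omega)
      simp only [List.cons_append, List.zip_cons_cons, renderLoop]
      refine List.cons_eq_cons.mpr ⟨?_, ?_⟩
      · simp [if_neg (by omega : ¬ c + avail = dur)]
      · have heq : dur - c - avail = dur - (c + avail) := by ring
        rw [heq]
        simpa using ihr

-- ===== VERDICT (by name: the statement is the Claim_ definition above) =====
theorem segment_task_spec : Claim_equal_segment_task := by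
  intro ct cd ss se dur id p sec tech tid hdom hpre
  unfold Spec_segment_task
  simp only [segment_task, segment_task_alt]
  by_cases h1 : dur ≤ se - ct
  · rw [if_pos h1, if_pos h1]
    simp [setLast1, setLastElem1]
  · have hd : 0 < dur ∧ ss < se := by
      rcases hpre with h | h
      · exact absurd h h1
      · exact h
    have ha : 0 < se - ss := by omega
    rw [if_neg h1, if_neg h1]
    by_cases h2 : 0 < se - ct
    · rw [if_pos h2]
      simp only [if_pos h2]
      have hfd : se - ct < dur := by omega
      -- the first breakpoint is se - ct itself
      have hcl : cutsLoop (se - ss) dur (se - ct) =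
          (se - ct) :: cutsLoop (se - ss) dur ((se - ct) + (se - ss)) := by
        rw [cutsLoop, dif_pos hfd, dif_pos ha]
      have hd' : 0 < dur - (se - ct) := by omega
      rw [setLast1_cons _ _ (segLoop_ne_nil _ _ _ _ _ hd' ha)]
      rw [hcl]
      simp only [List.cons_append, List.drop_succ_cons, List.drop_zero,
        List.zip_cons_cons, renderLoop]
      refine List.cons_eq_cons.mpr ⟨?_, ?_⟩
      · simp [if_neg (by omega : ¬ se - ct = dur)]
      · have := render_eq_segLoop ss (se - ss) dur
          [id, dur, p, sec, tech, tid] ha (dur - (se - ct)).toNat (se - ct) (cd + 1)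
          le_rfl (by omega)
        simpa using this.symm
    · rw [if_neg h2]
      simp only [if_neg h2]
      have h0 : (0 : Int) + (se - ss) = se - ss := by ring
      have := render_eq_segLoop ss (se - ss) dur
        [id, dur, p, sec, tech, tid] ha dur.toNat 0 (cd + 1) (by omega) (by omega)
      rw [h0] at this
      simpa using this.symm
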